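-- pv_equiv track=rewrite | github.com/inside-dragan/magisterska | mk/com/dragan/utils/DataUtils.py | getShifted
-- ===== SOURCE A (Python) =====
-- def getShifted(listData, num):
--     result = []
--     if num > 0:
--         for i in range(0, num):
--             result.append('no-value')
--         result.extend(listData)
--         result = result[:len(listData)]
--     elif num < 0:
--         result.extend(listData)
--         for i in range(0, -num):
--             result.append('no-value')
--         result = result[-num:]
--     else:
--         result = listData
--     return result
-- ===== SOURCE B (Python) =====
-- def getShifted(listData, num):
--     if num == 0:
--         return listData
--     n = len(listData)
--     return [listData[i - num] if 0 <= i - num < n else 'no-value' for i in range(n)]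
-- ===== Notes on version B (the rewrite author's own statement) =====
-- stated objective: simpler
-- what changed: Replaces A's pad-then-extend-then-slice construction with a single index comprehension mapping each output position directly to its source element (or the pad), with num==0 returning listData unchanged.
import Mathlib
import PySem

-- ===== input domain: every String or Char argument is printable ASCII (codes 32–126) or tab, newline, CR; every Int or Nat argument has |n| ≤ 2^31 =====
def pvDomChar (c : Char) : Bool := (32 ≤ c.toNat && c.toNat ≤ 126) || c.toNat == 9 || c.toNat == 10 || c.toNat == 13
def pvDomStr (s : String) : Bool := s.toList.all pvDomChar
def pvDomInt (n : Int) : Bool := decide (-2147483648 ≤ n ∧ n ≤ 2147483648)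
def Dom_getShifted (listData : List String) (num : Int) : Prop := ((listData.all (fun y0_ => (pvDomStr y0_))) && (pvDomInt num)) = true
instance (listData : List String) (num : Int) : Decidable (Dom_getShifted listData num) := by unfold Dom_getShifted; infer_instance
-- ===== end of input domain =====

-- B replaces A's pad-extend-slice construction by a direct index comprehension over output
-- positions (same return value everywhere; neither version mutates its argument).

-- ===== PORT A =====
def getShifted (listData : List String) (num : Int) : List String :=
  if num > 0 then
    -- result = []; for i in range(0, num): result.append('no-value')
    -- (each append is ported as cons onto a reversed accumulator, read back with .reverse:
    --  exact, and O(1) per append like Python's list.append)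
    let result : List String :=
      ((PySem.List.pyRange 0 num 1).foldl (fun r _ => "no-value" :: r) [].reverse).reverse
    -- result.extend(listData); result = result[:len(listData)]
    let result := result ++ listData
    PySem.List.slice result none (some (listData.length : Int))
  else if num < 0 then
    -- result = []; result.extend(listData)
    let result : List String := [] ++ listData
    -- for i in range(0, -num): result.append('no-value')   (same reversed-accumulator port)
    let result :=
      ((PySem.List.pyRange 0 (-num) 1).foldl (fun r _ => "no-value" :: r) result.reverse).reverse
    -- result = result[-num:]   (here -num > 0, a positive start index)
    PySem.List.slice result (some (-num)) none
  else
    listData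

-- ===== PORT B =====
def getShifted_alt (listData : List String) (num : Int) : List String :=
  if num = 0 then listData
  else
    let n := listData.length
    (List.range n).map (fun (i : Nat) =>
      if 0 ≤ (i : Int) - num ∧ (i : Int) - num < (n : Int) then
        -- listData[i - num]: the guard proves the index in range, so pyGet? is some; exact
        (PySem.List.pyGet? listData ((i : Int) - num)).getD "no-value"
      else "no-value")

-- ===== PRECONDITION & SPEC =====
def Spec_getShifted (listData : List String) (num : Int) (out : List String) : Prop := out = getShifted_alt listData num
instance (listData : List String) (num : Int) (out : List String) : Decidable (Spec_getShifted listData num out) := by unfold Spec_getShifted; infer_instance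

-- ===== CLAIM (what is proved, stated in full; the proofs are below) =====
def Claim_equal_getShifted : Prop := ∀ (listData : List String) (num : Int), Dom_getShifted listData num → Spec_getShifted listData num (getShifted listData num)

-- ===== LEMMAS AND PROOFS =====

theorem foldl_cons_pad (xs : List Int) (acc : List String) :
    xs.foldl (fun (r : List String) _ => "no-value" :: r) acc =
      List.replicate xs.length "no-value" ++ acc := by
  induction xs generalizing acc with
  | nil => simp
  | cons x xs ih =>
      rw [List.foldl_cons, ih, List.length_cons, List.replicate_succ']
      simp

theorem pads_eq_replicate (m : Int) (acc : List String) :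
    ((PySem.List.pyRange 0 m 1).foldl (fun (r : List String) _ => "no-value" :: r) acc.reverse).reverse =
      acc ++ List.replicate m.toNat "no-value" := by
  rw [foldl_cons_pad]
  simp [PySem.List.length_pyRange_one]

theorem getShifted_eq_alt (listData : List String) (num : Int) :
    getShifted listData num = getShifted_alt listData num := by
  unfold getShifted getShifted_alt
  by_cases h0 : num = 0
  · simp [h0]
  rcases lt_or_gt_of_ne h0 with hneg | hpos
  · -- num < 0 : left shift
    rw [if_neg (by omega), if_pos hneg, if_neg h0]
    simp only [List.nil_append]
    rw [pads_eq_replicate, PySem.List.slice_from _ (by omega)]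
    set k := (-num).toNat with hk
    have hknum : (k : Int) = -num := by omega
    apply List.ext_getElem
    · simp
    · intro i hA hB
      simp only [List.length_drop, List.length_append, List.length_replicate] at hA
      simp only [List.length_map, List.length_range] at hB
      rw [List.getElem_drop, List.getElem_map, List.getElem_range]
      have hcond : 0 ≤ (i : Int) - num ∧ (i : Int) - num < (listData.length : Int) ↔
          k + i < listData.length := by omega
      by_cases hin : k + i < listData.length
      · rw [List.getElem_append_left (by omega), if_pos (hcond.mpr hin)]
        rw [PySem.List.pyGet?_of_nonneg _ (by omega)]
        have : ((i : Int) - num).toNat = k + i := by omega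
        rw [this, List.getElem?_eq_getElem (by omega)]
        rfl
      · rw [List.getElem_append_right (by omega), if_neg (fun h => hin (hcond.mp h))]
        exact List.getElem_replicate ..
  · -- num > 0 : right shift
    rw [if_pos hpos, if_neg h0]
    rw [pads_eq_replicate, PySem.List.slice_to _ (by omega)]
    set k := num.toNat with hk
    have hknum : (k : Int) = num := by omega
    simp only [List.nil_append, Int.toNat_natCast]
    apply List.ext_getElem
    · simp
    · intro i hA hB
      simp only [List.length_take, List.length_append, List.length_replicate] at hA
      simp only [List.length_map, List.length_range] at hB
      rw [List.getElem_take, List.getElem_map, List.getElem_range]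
      have hcond : 0 ≤ (i : Int) - num ∧ (i : Int) - num < (listData.length : Int) ↔
          k ≤ i := by omega
      by_cases hin : i < k
      · rw [List.getElem_append_left (by simpa using hin), if_neg (by omega)]
        exact List.getElem_replicate ..
      · rw [List.getElem_append_right (by simpa using hin), if_pos (hcond.mpr (by omega))]
        rw [PySem.List.pyGet?_of_nonneg _ (by omega)]
        have : ((i : Int) - num).toNat = i - k := by omega
        rw [this, List.getElem?_eq_getElem (by omega)]
        simp

-- ===== VERDICT (by name: the statement is the Claim_ definition above) =====
theorem getShifted_spec : Claim_equal_getShifted := by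
  intro listData num _
  exact getShifted_eq_alt listData num
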